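-- pv_equiv track=rewrite | github.com/konst-aa/ccc | by-language/python/pclassics/2022-11-19/problem-8.py | molasses
-- ===== SOURCE A (Python) =====
-- from functools import reduce
--
-- def molasses(n, c, l):
--     pastes = {}
--     compressor = [(c[0], l[0])]
--     for letter, length in zip(c[1:],l[1:]):
--         if compressor[-1][0] == letter:
--             compressor[-1] = (letter, compressor[-1][1] + length)
--         else:
--             compressor += [(letter, length)]
--     for letter, length in compressor:
--         if letter not in pastes:
--             pastes[letter] = {1:0}
--         for i in range(2, length+1):
--             if i not in pastes[letter].keys():
--                 pastes[letter][i] = -1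
--             pastes[letter][i] += (length // i)
--     big = reduce(lambda acc, m: max(acc, max([((n-1) * pastes) for (n, pastes) in m.items()])), pastes.values(), 0)
--     t = 1 if big else 0
--     return sum(l) - big + t
-- ===== SOURCE B (Python) =====
-- def molasses(n, c, l):
--     pairs = list(zip(c, l))
--     runs = []
--     i = 0
--     while i < len(pairs):
--         letter = pairs[i][0]
--         total = 0
--         while i < len(pairs) and pairs[i][0] == letter:
--             total += pairs[i][1]
--             i += 1
--         runs.append((letter, total))
--     groups = {}
--     for letter, total in runs:
--         groups[letter] = groups.get(letter, []) + [total]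
--     big = 0
--     for rs in groups.values():
--         m = max(rs)
--         cand = set()
--         for L in rs:
--             k = 1
--             while k * k <= L:
--                 cand.add(k)
--                 cand.add(L // k)
--                 k += 1
--         for i2 in cand:
--             if 2 <= i2 <= m:
--                 s = -1
--                 for L in rs:
--                     if L >= i2:
--                         s += L // i2
--                 big = max(big, (i2 - 1) * s)
--     t = 1 if big else 0
--     return sum(l) - big + t
-- ===== Notes on version B (the rewrite author's own statement) =====
-- stated objective: alternative
-- what changed: A accumulates a dict bucket pastes[letter][i] for every i from 2 up to each run length (one dict update per unit of length); B groups run lengths per letter and evaluates the savings (i-1)*(sum of length//i minus 1) only at the O(sqrt(length)) floor-division block boundaries of each run length, where the per-letter maximum must be attained.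
import Mathlib
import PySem

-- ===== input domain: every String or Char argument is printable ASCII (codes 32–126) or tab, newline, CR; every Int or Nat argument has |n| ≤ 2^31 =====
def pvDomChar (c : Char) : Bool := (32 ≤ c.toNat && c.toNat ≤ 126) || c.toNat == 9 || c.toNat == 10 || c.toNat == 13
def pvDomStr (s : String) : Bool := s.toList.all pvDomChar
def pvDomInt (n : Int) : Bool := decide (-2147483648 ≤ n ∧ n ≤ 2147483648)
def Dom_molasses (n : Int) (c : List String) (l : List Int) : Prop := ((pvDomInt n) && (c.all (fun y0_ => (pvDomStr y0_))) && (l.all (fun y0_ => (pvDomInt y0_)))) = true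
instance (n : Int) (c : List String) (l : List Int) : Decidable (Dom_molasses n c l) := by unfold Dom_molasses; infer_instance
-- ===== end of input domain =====

-- B groups the run lengths per letter and evaluates the savings formula only at the
-- divisor-block boundaries of each run length (O(sqrt(L)) candidate divisors per run),
-- instead of accumulating one dict bucket per divisor i of every run as A does.

-- ===== PORT A =====
def molasses (n : Int) (c : List String) (l : List Int) : Int :=
  -- compressor = [(c[0], l[0])]; for letter, length in zip(c[1:], l[1:]): merge-or-append
  -- c[0] / l[0] raise IndexError on empty c or l: excluded by Pre_molasses (headI is the guard)
  let compressor := (List.zip (c.drop 1) (l.drop 1)).foldl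
    (fun comp p =>
      match comp.getLast? with
      | some last =>
        if last.1 == p.1 then comp.dropLast ++ [(p.1, last.2 + p.2)]
        else comp ++ [(p.1, p.2)]
      | none => comp)   -- unreachable: compressor is never empty
    [(c.headI, l.headI)]
  -- the inner dict pastes[letter] always holds exactly the keys 1..max(seen run lengths),
  -- inserted in ascending order; it is ported as an Array Int with the value of key i at slot
  -- i-1 (same loops, same branches, same values), so each O(1) Python dict operation stays O(1)
  -- ({1: 0} = #[0]; 'i not in keys()' = i > size; items = [(j+1, m[j]) for j in range(size)])
  let pastes := compressor.foldl
    (fun (d : PySem.Dict String (Array Int)) p =>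
      let d1 := if d.contains p.1 then d else d.insert p.1 #[0]
      (PySem.List.pyRange 2 (p.2 + 1)).foldl
        (fun d2 i =>
          let inner := d2.getD p.1 #[]
          let inner1 := if i ≤ (inner.size : Int) then inner else inner.push (-1)
          d2.insert p.1 (inner1.setIfInBounds (i - 1).toNat
            (inner1.getD (i - 1).toNat 0 + PySem.Int.floordiv p.2 i)))
        d1)
    PySem.Dict.empty
  let big : Int := pastes.values.foldl
    (fun acc m =>
      max acc (match PySem.List.max? ((List.range m.size).map
          (fun (j : Nat) => (((j : Int) + 1) - 1) * m.getD j 0)) (fun x => x) with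
               | some v => v
               | none => 0))   -- unreachable: every inner array holds key 1
    0
  let t : Int := if big ≠ 0 then 1 else 0
  l.sum - big + t

-- ===== PORT B =====
-- inner while of B: consume pairs with the same letter, summing the lengths
def runGroup (a : String) (total : Int) : List (String × Int) → Int × List (String × Int)
  | [] => (total, [])
  | (b, x) :: rest => if b == a then runGroup a (total + x) rest else (total, (b, x) :: rest)

-- outer while of B over the zipped pairs (fuel = list length, a pure totalization guard)
def buildRunsAux : Nat → List (String × Int) → List (String × Int)
  | _, [] => []
  | 0, _ :: _ => []   -- unreachable: fuel = length of the list
  | fuel + 1, (a, x) :: rest =>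
    let g := runGroup a (0 + x) rest
    (a, g.1) :: buildRunsAux fuel g.2

def buildRuns (ps : List (String × Int)) : List (String × Int) := buildRunsAux ps.length ps

-- while k*k <= L: cand.add(k); cand.add(L // k); k += 1  (fuel is a pure totalization guard)
def candAux : Nat → Int → Int → PySem.Set Int → PySem.Set Int
  | 0, _, _, s => s   -- unreachable: the initial fuel bounds the trip count
  | fuel + 1, L, k, s =>
    if k * k ≤ L then
      candAux fuel L (k + 1) (PySem.Set.add (PySem.Set.add s k) (PySem.Int.floordiv L k))
    else s

def molasses_alt (n : Int) (c : List String) (l : List Int) : Int :=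
  let pairs := List.zip c l
  let runs := buildRuns pairs
  let groups := runs.foldl
    (fun (g : PySem.Dict String (List Int)) p => g.modify p.1 [] (fun v => v ++ [p.2]))
    PySem.Dict.empty
  let big : Int := groups.values.foldl
    (fun acc rs =>
      let m := match PySem.List.max? rs (fun x => x) with | some v => v | none => 0
      let cand := rs.foldl (fun s L => candAux (L.toNat + 1) L 1 s) PySem.Set.empty
      cand.foldl
        (fun acc2 i2 =>
          if 2 ≤ i2 ∧ i2 ≤ m then
            max acc2 ((i2 - 1) *
              (rs.foldl (fun s L => if i2 ≤ L then s + PySem.Int.floordiv L i2 else s) (-1)))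
          else acc2)
        acc)
    0
  let t : Int := if big ≠ 0 then 1 else 0
  l.sum - big + t

-- ===== PRECONDITION & SPEC =====
-- Pre_ excludes exactly the inputs where A raises IndexError: empty c or empty l (c[0] / l[0]).
def Pre_molasses (n : Int) (c : List String) (l : List Int) : Prop := c ≠ [] ∧ l ≠ []
instance (n : Int) (c : List String) (l : List Int) : Decidable (Pre_molasses n c l) := by
  unfold Pre_molasses; infer_instance

def pvWitness_molasses : Int × List String × List Int := (0, ["a", "b", "a"], [3, 2, 4])


def Spec_molasses (n : Int) (c : List String) (l : List Int) (out : Int) : Prop :=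
  out = molasses_alt n c l
instance (n : Int) (c : List String) (l : List Int) (out : Int) : Decidable (Spec_molasses n c l out) := by
  unfold Spec_molasses; infer_instance

-- ===== CLAIM (what is proved, stated in full; the proofs are below) =====
def Claim_equal_molasses : Prop := ∀ (n : Int) (c : List String) (l : List Int),
  Dom_molasses n c l → Pre_molasses n c l → Spec_molasses n c l (molasses n c l)

-- ===== LEMMAS AND PROOFS =====

-- generic bounds for running-max style folds
theorem pvFoldl_ge_init {α : Type} (f : Int → α → Int) :
    ∀ (xs : List α) (a : Int), (∀ b x, x ∈ xs → b ≤ f b x) → a ≤ xs.foldl f a := by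
  intro xs
  induction xs with
  | nil => intro a _; simp
  | cons y t ih =>
    intro a h
    exact le_trans (h a y (by simp)) (ih _ (fun b x hx => h b x (by simp [hx])))

theorem pvFoldl_le_bound {α : Type} (f : Int → α → Int) :
    ∀ (xs : List α) (a b : Int), a ≤ b →
      (∀ acc x, x ∈ xs → acc ≤ b → f acc x ≤ b) → xs.foldl f a ≤ b := by
  intro xs
  induction xs with
  | nil => intro a b ha _; simpa using ha
  | cons y t ih =>
    intro a b ha h
    exact ih (f a y) b (h a y (by simp) ha) (fun acc x hx hacc => h acc x (by simp [hx]) hacc)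

theorem pvLe_foldl_of_mem {α : Type} (f : Int → α → Int) :
    ∀ (xs : List α) (x : α) (v a : Int), (∀ b y, y ∈ xs → b ≤ f b y) →
      x ∈ xs → (∀ b, v ≤ f b x) → v ≤ xs.foldl f a := by
  intro xs
  induction xs with
  | nil => intro x v a _ hx; simp at hx
  | cons y t ih =>
    intro x v a hmono hx hv
    rcases List.mem_cons.mp hx with h | h
    · subst h
      exact le_trans (hv a)
        (pvFoldl_ge_init f t (f a x) (fun b z hz => hmono b z (by simp [hz])))
    · exact ih x v (f a y) (fun b z hz => hmono b z (by simp [hz])) h hv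

-- run-length compression, shared reference form
def consRuns (a : String) (t : Int) : List (String × Int) → List (String × Int)
  | [] => [(a, t)]
  | (b, x) :: ps => if b == a then consRuns a (t + x) ps else (a, t) :: consRuns b x ps

theorem runGroup_snd_length_le (a : String) : ∀ (ps : List (String × Int)) (t : Int),
    (runGroup a t ps).2.length ≤ ps.length := by
  intro ps
  induction ps with
  | nil => intro t; simp [runGroup]
  | cons p rest ih =>
    intro t
    obtain ⟨b, x⟩ := p
    by_cases h : (b == a) = true
    · simpa [runGroup, h] using Nat.le_succ_of_le (ih (t + x))
    · simp [runGroup, h]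

theorem consRuns_eq_runGroup : ∀ (ps : List (String × Int)) (a : String) (t : Int),
    consRuns a t ps = (a, (runGroup a t ps).1) ::
      (match (runGroup a t ps).2 with
       | [] => []
       | (b, x) :: r => consRuns b x r) := by
  intro ps
  induction ps with
  | nil => intro a t; simp [consRuns, runGroup]
  | cons p rest ih =>
    intro a t
    obtain ⟨b, x⟩ := p
    by_cases h : (b == a) = true
    · simpa [consRuns, runGroup, h] using ih a (t + x)
    · simp [consRuns, runGroup, h]

theorem buildRunsAux_eq : ∀ (fuel : Nat) (ps : List (String × Int)), ps.length ≤ fuel →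
    buildRunsAux fuel ps =
      (match ps with | [] => [] | (a, x) :: rest => consRuns a x rest) := by
  intro fuel
  induction fuel with
  | zero =>
    intro ps hps
    have : ps = [] := List.eq_nil_of_length_eq_zero (Nat.le_zero.mp hps)
    subst this; rfl
  | succ fuel ih =>
    intro ps hps
    match ps with
    | [] => rfl
    | (a, x) :: rest =>
      have hlen : (runGroup a (0 + x) rest).2.length ≤ fuel :=
        le_trans (runGroup_snd_length_le a rest (0 + x)) (Nat.lt_succ_iff.mp hps)
      have := ih (runGroup a (0 + x) rest).2 hlen
      calc buildRunsAux (fuel + 1) ((a, x) :: rest)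
          = (a, (runGroup a (0 + x) rest).1) :: buildRunsAux fuel (runGroup a (0 + x) rest).2 := rfl
        _ = consRuns a (0 + x) rest := by rw [this, ← consRuns_eq_runGroup]
        _ = consRuns a x rest := by rw [zero_add]

theorem buildRuns_cons (a : String) (x : Int) (ps : List (String × Int)) :
    buildRuns ((a, x) :: ps) = consRuns a x ps := by
  simpa using buildRunsAux_eq ((a, x) :: ps).length ((a, x) :: ps) le_rfl

theorem compress_foldl : ∀ (ps : List (String × Int)) (front : List (String × Int)) (a : String) (t : Int),
    ps.foldl
      (fun comp p =>
        match comp.getLast? with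
        | some last =>
          if last.1 == p.1 then comp.dropLast ++ [(p.1, last.2 + p.2)]
          else comp ++ [(p.1, p.2)]
        | none => comp)
      (front ++ [(a, t)]) = front ++ consRuns a t ps := by
  intro ps
  induction ps with
  | nil => intro front a t; simp [consRuns]
  | cons p rest ih =>
    intro front a t
    obtain ⟨b, x⟩ := p
    by_cases h : (b == a) = true
    · have hab : a = b := (beq_iff_eq.mp h).symm
      subst hab
      simp only [List.foldl_cons, List.getLast?_concat, beq_self_eq_true, if_pos,
        List.dropLast_concat, consRuns]
      exact ih front a (t + x)
    · have hab : ¬ (a == b) = true := by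
        intro hc; exact h (by simpa [beq_iff_eq] using (beq_iff_eq.mp hc).symm)
      simp only [List.foldl_cons, List.getLast?_concat, consRuns, h, if_neg hab]
      have := ih (front ++ [(a, t)]) b x
      simpa [List.append_assoc] using this


-- ---- pyRange facts ----
theorem pyRange_nil (a b : Int) (h : b ≤ a) : PySem.List.pyRange a b = [] := by
  rw [List.eq_nil_iff_forall_not_mem]
  intro x hx
  have := PySem.List.mem_pyRange_one.mp hx
  omega

-- ---- per-letter run lengths and the savings sum ----
def lensOf (rs : List (String × Int)) (w : String) : List Int :=
  (rs.filter (fun p => p.1 == w)).map (fun x => x.2)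

def Sval (ls : List Int) (i : Int) : Int :=
  -1 + ((ls.filter (fun L => decide (i ≤ L))).map (fun L => PySem.Int.floordiv L i)).sum

theorem Sval_append (ls : List Int) (L i : Int) :
    Sval (ls ++ [L]) i = Sval ls i + (if i ≤ L then PySem.Int.floordiv L i else 0) := by
  by_cases h : i ≤ L <;> simp [Sval, List.filter_append, h] <;> ring

theorem Sval_neg_of_no (ls : List Int) (i : Int) (h : ∀ L ∈ ls, ¬ i ≤ L) : Sval ls i = -1 := by
  have hnil : ls.filter (fun L => decide (i ≤ L)) = [] :=
    List.filter_eq_nil_iff.mpr (by intro L hL; simpa using h L hL)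
  simp [Sval, hnil]

theorem lensOf_append_self (rs : List (String × Int)) (w : String) (L : Int) :
    lensOf (rs ++ [(w, L)]) w = lensOf rs w ++ [L] := by
  simp [lensOf, List.filter_append]

theorem lensOf_append_ne (rs : List (String × Int)) (w w' : String) (L : Int) (h : w' ≠ w) :
    lensOf (rs ++ [(w, L)]) w' = lensOf rs w' := by
  have : (w == w') = false := beq_eq_false_iff_ne.mpr (Ne.symm h)
  simp [lensOf, List.filter_append, this]

theorem lensOf_nil_of_not_mem (rs : List (String × Int)) (w : String)
    (h : w ∉ rs.map (fun p => p.1)) : lensOf rs w = [] := by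
  have : rs.filter (fun p => p.1 == w) = [] := by
    refine List.filter_eq_nil_iff.mpr ?_
    intro p hp hbeq
    exact h (List.mem_map.mpr ⟨p, hp, beq_iff_eq.mp hbeq⟩)
  simp [lensOf, this]

-- ---- array lemmas for the inner store ----
theorem arr_getD_set_self (a : Array Int) (i : Nat) (v : Int) (h : i < a.size) :
    (a.setIfInBounds i v).getD i 0 = v := by simp [Array.getD, h]

theorem arr_getD_set_ne (a : Array Int) (i j : Nat) (v : Int) (h : j ≠ i) :
    (a.setIfInBounds i v).getD j 0 = a.getD j 0 := by
  unfold Array.getD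
  by_cases hj : j < a.size
  · simp [hj, Array.getElem_setIfInBounds]
    intro he
    exact absurd he.symm h
  · simp [hj]

theorem arr_getD_push_lt (a : Array Int) (v : Int) (j : Nat) (h : j < a.size) :
    (a.push v).getD j 0 = a.getD j 0 := by
  unfold Array.getD
  simp [h, Nat.lt_succ_of_lt h, Array.getElem_push]

theorem arr_getD_push_self (a : Array Int) (v : Int) :
    (a.push v).getD a.size 0 = v := by simp [Array.getD]

theorem arr_getD_oob (a : Array Int) (j : Nat) (h : ¬ j < a.size) : a.getD j 0 = 0 := by
  simp [Array.getD, h]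

-- ---- the inner-store update of A, as a single step ----
def innerG (L : Int) (m : Array Int) (i : Int) : Array Int :=
  let inner1 := if i ≤ (m.size : Int) then m else m.push (-1)
  inner1.setIfInBounds (i - 1).toNat (inner1.getD (i - 1).toNat 0 + PySem.Int.floordiv L i)

theorem innerG_size (L : Int) (m : Array Int) (i : Int) :
    ((innerG L m i).size : Int) =
      if i ≤ (m.size : Int) then (m.size : Int) else (m.size : Int) + 1 := by
  by_cases h : i ≤ (m.size : Int) <;>
    simp [innerG, h, Array.size_setIfInBounds, Array.size_push]

theorem innerG_getD_self (L : Int) (m : Array Int) (i : Int) (h2 : 2 ≤ i)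
    (hle : i ≤ (m.size : Int) + 1) :
    (innerG L m i).getD (i - 1).toNat 0
      = (if i ≤ (m.size : Int) then m.getD (i - 1).toNat 0 else -1) + PySem.Int.floordiv L i := by
  by_cases h : i ≤ (m.size : Int)
  · have hlt : (i - 1).toNat < m.size := by omega
    simp only [innerG, if_pos h]
    rw [arr_getD_set_self _ _ _ hlt]
  · have hidx : (i - 1).toNat = m.size := by omega
    simp only [innerG, if_neg h]
    rw [hidx]
    rw [arr_getD_set_self _ _ _ (by simp [Array.size_push])]
    rw [arr_getD_push_self]

theorem innerG_getD_ne (L : Int) (m : Array Int) (i j : Int) (hj : 1 ≤ j) (hne : j ≠ i)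
    (h2 : 2 ≤ i) (hle : i ≤ (m.size : Int) + 1) :
    (innerG L m i).getD (j - 1).toNat 0 = m.getD (j - 1).toNat 0 := by
  have hidx : (j - 1).toNat ≠ (i - 1).toNat := by omega
  by_cases h : i ≤ (m.size : Int)
  · simp only [innerG, if_pos h]
    exact arr_getD_set_ne _ _ _ _ hidx
  · simp only [innerG, if_neg h]
    rw [arr_getD_set_ne _ _ _ _ hidx]
    by_cases hjlt : (j - 1).toNat < m.size
    · exact arr_getD_push_lt _ _ _ hjlt
    · have hjlt' : ¬ (j - 1).toNat < (m.push (-1)).size := by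
        rw [Array.size_push]
        omega
      rw [arr_getD_oob _ _ hjlt', arr_getD_oob _ _ hjlt]

-- the fold over range(2, L+1), processed in ascending order
theorem foldl_innerG_range (L : Int) : ∀ (fuel : Nat) (a : Int) (m : Array Int),
    (L + 1 - a).toNat = fuel → 2 ≤ a → a ≤ (m.size : Int) + 1 → 1 ≤ m.size →
    ((((PySem.List.pyRange a (L + 1)).foldl (innerG L) m).size : Int)
        = if a ≤ L then max ((m.size : Int)) L else (m.size : Int)) ∧
    (∀ j : Int, 1 ≤ j →
      ((PySem.List.pyRange a (L + 1)).foldl (innerG L) m).getD (j - 1).toNat 0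
        = if a ≤ j ∧ j ≤ L then
            (if j ≤ (m.size : Int) then m.getD (j - 1).toNat 0 else -1) + PySem.Int.floordiv L j
          else m.getD (j - 1).toNat 0) := by
  intro fuel
  induction fuel with
  | zero =>
    intro a m hfuel h2 hle hsz
    have hLa : L < a := by omega
    rw [pyRange_nil a (L + 1) (by omega)]
    refine ⟨by rw [List.foldl_nil, if_neg (by omega)], ?_⟩
    intro j hj
    rw [List.foldl_nil, if_neg (by omega)]
  | succ fuel ih =>
    intro a m hfuel h2 hle hsz
    by_cases haL : a ≤ L
    · rw [PySem.List.pyRange_one_cons (by omega : a < L + 1), List.foldl_cons]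
      have hm'size : (((innerG L m a).size : Int)) = max (m.size : Int) a := by
        rw [innerG_size]
        by_cases h : a ≤ (m.size : Int)
        · rw [if_pos h, max_eq_left h]
        · rw [if_neg h, max_eq_right (by omega : (m.size : Int) ≤ a)]
          omega
      have h1m' : 1 ≤ (innerG L m a).size := by
        have h' : 1 ≤ ((innerG L m a).size : Int) := by
          rw [hm'size]
          exact le_trans (by omega : (1 : Int) ≤ (m.size : Int)) (le_max_left _ _)
        omega
      obtain ⟨hsize, hval⟩ := ih (a + 1) (innerG L m a) (by omega) (by omega)
        (by rw [hm'size]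
            have := le_max_right (m.size : Int) a
            omega) h1m'
      constructor
      · rw [if_pos haL, hsize]
        by_cases h1 : a + 1 ≤ L
        · rw [if_pos h1, hm'size, max_assoc, max_eq_right (by omega : a ≤ L)]
        · rw [if_neg h1, hm'size]
          have haeq : a = L := by omega
          rw [haeq]
      · intro j hj
        rw [hval j hj]
        by_cases hja : j = a
        · rw [hja, if_neg (by omega), innerG_getD_self L m a h2 hle,
            if_pos (show a ≤ a ∧ a ≤ L from ⟨le_refl a, haL⟩)]
        · have hgd : (innerG L m a).getD (j - 1).toNat 0 = m.getD (j - 1).toNat 0 :=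
            innerG_getD_ne L m a j hj hja h2 hle
          by_cases hcond : a + 1 ≤ j ∧ j ≤ L
          · rw [if_pos hcond, hgd, if_pos (⟨by omega, hcond.2⟩ : a ≤ j ∧ j ≤ L)]
            by_cases h3 : j ≤ (m.size : Int)
            · rw [if_pos (by rw [hm'size]; exact le_trans h3 (le_max_left _ _)), if_pos h3]
            · rw [if_neg (by
                  rw [hm'size]
                  rcases max_choice ((m.size : Int)) a with h | h <;> omega),
                if_neg h3]
          · rw [if_neg hcond, hgd, if_neg (by omega)]
    · rw [pyRange_nil a (L + 1) (by omega)]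
      refine ⟨by rw [List.foldl_nil, if_neg haL], ?_⟩
      intro j hj
      rw [List.foldl_nil, if_neg (by omega)]

-- ---- the per-run outer step of A ----
def stepA : PySem.Dict String (Array Int) → String × Int → PySem.Dict String (Array Int) :=
  fun d p =>
    let d1 := if d.contains p.1 then d else d.insert p.1 #[0]
    (PySem.List.pyRange 2 (p.2 + 1)).foldl
      (fun d2 i =>
        let inner := d2.getD p.1 #[]
        let inner1 := if i ≤ (inner.size : Int) then inner else inner.push (-1)
        d2.insert p.1 (inner1.setIfInBounds (i - 1).toNat
          (inner1.getD (i - 1).toNat 0 + PySem.Int.floordiv p.2 i)))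
      d1

theorem stepA_eq (d : PySem.Dict String (Array Int)) (p : String × Int) :
    stepA d p =
      (PySem.List.pyRange 2 (p.2 + 1)).foldl
        (fun d2 i => d2.insert p.1 (innerG p.2 (d2.getD p.1 #[]) i))
        (if d.contains p.1 then d else d.insert p.1 #[0]) := rfl

theorem foldl_insert_getD (w : String) (G : Array Int → Int → Array Int) :
    ∀ (is : List Int) (i0 : Int) (d : PySem.Dict String (Array Int)),
      ((i0 :: is).foldl (fun d2 i => d2.insert w (G (d2.getD w #[]) i)) d)
        = d.insert w ((i0 :: is).foldl G (d.getD w #[])) := by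
  intro is
  induction is with
  | nil => intro i0 d; rfl
  | cons i1 t ih =>
    intro i0 d
    show ((i1 :: t).foldl (fun d2 i => d2.insert w (G (d2.getD w #[]) i))
        (d.insert w (G (d.getD w #[]) i0))) = _
    rw [ih i1 (d.insert w (G (d.getD w #[]) i0))]
    rw [PySem.Dict.getD_insert_self, PySem.Dict.insert_insert_self]
    rfl

def InnerOK (m : Array Int) (ls : List Int) : Prop :=
  1 ≤ m.size ∧
  (∀ i : Int, 2 ≤ i → ((i ≤ (m.size : Int)) ↔ (∃ L ∈ ls, i ≤ L))) ∧
  m.getD 0 0 = 0 ∧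
  (∀ i : Int, 2 ≤ i → i ≤ (m.size : Int) → m.getD (i - 1).toNat 0 = Sval ls i)

def PastesOK (d : PySem.Dict String (Array Int)) (rs : List (String × Int)) : Prop :=
  d.keys = PySem.Set.ofList (rs.map (fun p => p.1)) ∧ d.keys.Nodup ∧
  (∀ w ∈ d.keys, InnerOK (d.getD w #[]) (lensOf rs w))

theorem set_add_of_mem {s : List String} {x : String} (h : x ∈ s) : PySem.Set.add s x = s := by
  show (if s.contains x = true then s else s ++ [x]) = s
  rw [if_pos (List.contains_iff_mem.mpr h)]

theorem set_add_of_not_mem {s : List String} {x : String} (h : x ∉ s) :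
    PySem.Set.add s x = s ++ [x] := by
  show (if s.contains x = true then s else s ++ [x]) = s ++ [x]
  rw [if_neg (fun hc => h (List.contains_iff_mem.mp hc))]

theorem ofList_append_singleton (xs : List String) (x : String) :
    PySem.Set.ofList (xs ++ [x]) = PySem.Set.add (PySem.Set.ofList xs) x := by
  rw [PySem.Set.ofList_eq_foldl, PySem.Set.ofList_eq_foldl, List.foldl_append]
  rfl

theorem innerOK_base : InnerOK #[0] [] := by
  refine ⟨by decide, ?_, by decide, ?_⟩
  · intro i h2
    constructor
    · intro h
      have : ((#[(0 : Int)].size : Int)) = 1 := by decide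
      omega
    · rintro ⟨L, hL, _⟩
      simp at hL
  · intro i h2 hle
    have : ((#[(0 : Int)].size : Int)) = 1 := by decide
    omega

theorem stepA_preserves (d : PySem.Dict String (Array Int)) (rs : List (String × Int))
    (w : String) (L : Int) (h : PastesOK d rs) : PastesOK (stepA d (w, L)) (rs ++ [(w, L)]) := by
  obtain ⟨hkeys, hnd, hinner⟩ := h
  rw [stepA_eq]
  set d1 := if d.contains w then d else d.insert w #[0] with hd1
  have hd1keys : d1.keys = PySem.Set.add d.keys w := by
    by_cases hc : d.contains w = true
    · have hw : w ∈ d.keys := (PySem.Dict.contains_iff_mem_keys d w).mp hc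
      rw [hd1, if_pos hc, set_add_of_mem hw]
    · have hw : w ∉ d.keys := fun hmem => hc ((PySem.Dict.contains_iff_mem_keys d w).mpr hmem)
      rw [hd1, if_neg hc, PySem.Dict.keys_insert_of_not_contains d _ (Bool.not_eq_true _ ▸ hc),
        set_add_of_not_mem hw]
  have hd1nd : d1.keys.Nodup := by
    by_cases hc : d.contains w = true
    · rw [hd1, if_pos hc]; exact hnd
    · rw [hd1, if_neg hc]; exact PySem.Dict.nodup_keys_insert _ _ _ hnd
  have hd1c : d1.contains w = true := by
    by_cases hc : d.contains w = true
    · rw [hd1, if_pos hc]; exact hc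
    · rw [hd1, if_neg hc, PySem.Dict.contains_insert]; simp
  have hd1getD_ne : ∀ w' : String, w' ≠ w → d1.getD w' #[] = d.getD w' #[] := by
    intro w' hne
    by_cases hc : d.contains w = true
    · rw [hd1, if_pos hc]
    · rw [hd1, if_neg hc]; exact PySem.Dict.getD_insert_of_ne _ _ _ hne
  have hd1w : InnerOK (d1.getD w #[]) (lensOf rs w) := by
    by_cases hc : d.contains w = true
    · have hw : w ∈ d.keys := (PySem.Dict.contains_iff_mem_keys d w).mp hc
      rw [hd1, if_pos hc]
      exact hinner w hw
    · have hw : w ∉ d.keys := fun hmem => hc ((PySem.Dict.contains_iff_mem_keys d w).mpr hmem)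
      have hlens : lensOf rs w = [] := by
        apply lensOf_nil_of_not_mem
        intro hmem
        exact hw (by rw [hkeys]; exact (PySem.Set.mem_ofList _ _).mpr hmem)
      rw [hd1, if_neg hc, PySem.Dict.getD_insert_self, hlens]
      exact innerOK_base
  have hd1mem : ∀ w' : String, w' ∈ d1.keys ↔ (w' ∈ d.keys ∨ w' = w) := by
    intro w'
    rw [hd1keys, PySem.Set.mem_add]
  have hkeysNew : PySem.Set.add d.keys w = PySem.Set.ofList ((rs ++ [(w, L)]).map (fun p => p.1)) := by
    rw [List.map_append]
    simp only [List.map_cons, List.map_nil]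
    rw [ofList_append_singleton, ← hkeys]
  have hmemR : ∀ x : Int, x ∈ PySem.List.pyRange 2 (L + 1) ↔ 2 ≤ x ∧ x ≤ L := by
    intro x
    rw [PySem.List.mem_pyRange_one]
    omega
  cases hr : PySem.List.pyRange 2 (L + 1) with
  | nil =>
    simp only [List.foldl_nil]
    have hL : L ≤ 1 := by
      by_contra hL
      have : (2 : Int) ∈ PySem.List.pyRange 2 (L + 1) := (hmemR 2).mpr (by omega)
      rw [hr] at this
      simp at this
    refine ⟨by rw [hd1keys, hkeysNew], hd1nd, ?_⟩
    intro w' hw'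
    by_cases hww : w' = w
    · subst hww
      rw [lensOf_append_self]
      obtain ⟨h1I, hiffI, h0I, hvalI⟩ := hd1w
      refine ⟨h1I, ?_, h0I, ?_⟩
      · intro i h2
        rw [hiffI i h2]
        constructor
        · rintro ⟨Lw, hLw, hiL⟩
          exact ⟨Lw, by simp [hLw], hiL⟩
        · rintro ⟨Lw, hLw, hiL⟩
          rcases List.mem_append.mp hLw with hm | hm
          · exact ⟨Lw, hm, hiL⟩
          · have : Lw = L := by simpa using hm
            omega
      · intro i h2 hle
        rw [Sval_append, if_neg (by omega)]
        simpa using hvalI i h2 hle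
    · rw [lensOf_append_ne rs w w' L hww, hd1getD_ne w' hww]
      have : w' ∈ d.keys := by
        rcases (hd1mem w').mp hw' with h | h
        · exact h
        · exact absurd h hww
      exact hinner w' this
  | cons i0 t =>
    rw [foldl_insert_getD]
    rw [← hr]
    set inner0 := d1.getD w #[] with hinner0
    set mfin := (PySem.List.pyRange 2 (L + 1)).foldl (innerG L) inner0 with hmfin
    have h2L : 2 ≤ L := by
      have : i0 ∈ PySem.List.pyRange 2 (L + 1) := by rw [hr]; simp
      have := (hmemR i0).mp this
      omega
    obtain ⟨h1I, hiffI, h0I, hvalI⟩ := hd1w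
    obtain ⟨hsizeF, hvalF⟩ := foldl_innerG_range L (L + 1 - 2).toNat 2 inner0 rfl
      (le_refl 2) (by omega) h1I
    rw [← hmfin] at hsizeF hvalF
    rw [if_pos h2L] at hsizeF
    have hMch := max_choice ((inner0.size : Int)) L
    have hkeys2 : (d1.insert w mfin).keys = d1.keys := PySem.Dict.keys_insert_of_contains d1 mfin hd1c
    refine ⟨by rw [hkeys2, hd1keys, hkeysNew], by rw [hkeys2]; exact hd1nd, ?_⟩
    intro w' hw'
    rw [hkeys2] at hw'
    by_cases hww : w' = w
    · subst hww
      rw [PySem.Dict.getD_insert_self, lensOf_append_self]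
      have h1F : 1 ≤ mfin.size := by
        have h' : 1 ≤ ((mfin.size : Int)) := by
          rw [hsizeF]
          exact le_trans (by omega : (1 : Int) ≤ (inner0.size : Int)) (le_max_left _ _)
        omega
      refine ⟨h1F, ?_, ?_, ?_⟩
      · intro i h2
        rw [hsizeF]
        constructor
        · intro hle
          by_cases hiL : i ≤ L
          · exact ⟨L, by simp, hiL⟩
          · have : i ≤ ((inner0.size : Int)) := by
              rcases hMch with h | h <;> omega
            obtain ⟨Lw, hLw, hiLw⟩ := (hiffI i h2).mp this
            exact ⟨Lw, by simp [hLw], hiLw⟩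
        · rintro ⟨Lw, hLw, hiLw⟩
          rcases List.mem_append.mp hLw with hm | hm
          · have : i ≤ ((inner0.size : Int)) := (hiffI i h2).mpr ⟨Lw, hm, hiLw⟩
            exact le_trans this (le_max_left _ _)
          · have : Lw = L := by simpa using hm
            exact le_trans (by omega) (le_max_right ((inner0.size : Int)) L)
      · have hv1 := hvalF 1 (le_refl 1)
        rw [if_neg (by omega)] at hv1
        have h01 : ((1 : Int) - 1).toNat = 0 := rfl
        rw [h01] at hv1
        exact hv1.trans h0I
      · intro i h2 hle
        rw [hsizeF] at hle
        rw [hvalF i (by omega)]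
        by_cases hiL : i ≤ L
        · rw [if_pos ⟨h2, hiL⟩, Sval_append, if_pos hiL]
          by_cases hsz : i ≤ ((inner0.size : Int))
          · rw [if_pos hsz, hvalI i h2 hsz]
          · rw [if_neg hsz]
            have hno : ∀ Lw ∈ lensOf rs w', ¬ i ≤ Lw := by
              intro Lw hLw hiLw
              exact hsz ((hiffI i h2).mpr ⟨Lw, hLw, hiLw⟩)
            rw [Sval_neg_of_no _ _ hno]
        · rw [if_neg (by omega), Sval_append, if_neg hiL, add_zero]
          have hsz : i ≤ ((inner0.size : Int)) := by
            rcases hMch with h | h <;> omega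
          exact hvalI i h2 hsz
    · rw [PySem.Dict.getD_insert_of_ne _ _ _ hww, lensOf_append_ne rs w w' L hww, hd1getD_ne w' hww]
      have : w' ∈ d.keys := by
        rcases (hd1mem w').mp hw' with h | h
        · exact h
        · exact absurd h hww
      exact hinner w' this

def pastesOf (runs : List (String × Int)) : PySem.Dict String (Array Int) :=
  runs.foldl stepA PySem.Dict.empty

theorem pastesOf_ok_aux : ∀ (rs2 rs1 : List (String × Int)) (d : PySem.Dict String (Array Int)),
    PastesOK d rs1 → PastesOK (rs2.foldl stepA d) (rs1 ++ rs2) := by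
  intro rs2
  induction rs2 with
  | nil => intro rs1 d h; simpa using h
  | cons p t ih =>
    intro rs1 d h
    obtain ⟨w, L⟩ := p
    have := ih (rs1 ++ [(w, L)]) (stepA d (w, L)) (stepA_preserves d rs1 w L h)
    simpa [List.append_assoc] using this

theorem pastesOf_ok (runs : List (String × Int)) : PastesOK (pastesOf runs) runs := by
  have hbase : PastesOK PySem.Dict.empty [] := by
    refine ⟨by rfl, by simp [PySem.Dict.keys_empty], ?_⟩
    intro w hw
    simp [PySem.Dict.keys_empty] at hw
  simpa using pastesOf_ok_aux runs [] PySem.Dict.empty hbase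

-- ---- B-side: the groups dict ----
def groupsOf (runs : List (String × Int)) : PySem.Dict String (List Int) :=
  runs.foldl (fun g p => g.modify p.1 [] (fun v => v ++ [p.2])) PySem.Dict.empty

theorem set_update_nil (xs : List String) : PySem.Set.update [] xs = PySem.Set.ofList xs := by
  rw [PySem.Set.ofList_eq_foldl]; rfl

theorem groupsOf_keys (runs : List (String × Int)) :
    (groupsOf runs).keys = PySem.Set.ofList (runs.map (fun p => p.1)) := by
  have h := PySem.Dict.keys_foldl_modify_key runs (fun p => p.1) ([] : List Int)
    (fun _ p => fun v => v ++ [p.2]) PySem.Dict.empty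
  rw [PySem.Dict.keys_empty, set_update_nil] at h
  exact h

theorem groupsOf_nodup (runs : List (String × Int)) : (groupsOf runs).keys.Nodup := by
  have h := PySem.Dict.nodup_keys_foldl_modify_key runs (fun p => p.1) ([] : List Int)
    (fun _ p => fun v => v ++ [p.2]) PySem.Dict.empty (by rw [PySem.Dict.keys_empty]; exact List.nodup_nil)
  exact h

theorem groupsOf_getD (runs : List (String × Int)) (w : String) :
    (groupsOf runs).getD w [] = lensOf runs w := by
  have h := PySem.Dict.getD_foldl_modify_append runs PySem.Dict.empty w
  rw [PySem.Dict.getD_empty] at h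
  exact h

-- ---- candidate-set membership ----
theorem candAux_preserve : ∀ (fuel : Nat) (L k : Int) (s : PySem.Set Int) (x : Int),
    x ∈ s → x ∈ candAux fuel L k s := by
  intro fuel
  induction fuel with
  | zero => intro L k s x hx; simpa [candAux] using hx
  | succ f ih =>
    intro L k s x hx
    by_cases h : k * k ≤ L
    · simp only [candAux, if_pos h]
      exact ih _ _ _ _ ((PySem.Set.mem_add _ _ _).mpr
        (Or.inl ((PySem.Set.mem_add _ _ _).mpr (Or.inl hx))))
    · simpa [candAux, if_neg h] using hx

theorem candAux_mem : ∀ (fuel : Nat) (L k j : Int) (s : PySem.Set Int),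
    1 ≤ k → k ≤ j → j * j ≤ L → (j - k).toNat < fuel →
    j ∈ candAux fuel L k s ∧ PySem.Int.floordiv L j ∈ candAux fuel L k s := by
  intro fuel
  induction fuel with
  | zero => intro L k j s _ _ _ hf; omega
  | succ f ih =>
    intro L k j s hk hkj hjj hf
    have hkk : k * k ≤ L :=
      le_trans (mul_le_mul hkj hkj (by omega) (by omega)) hjj
    simp only [candAux, if_pos hkk]
    by_cases heq : k = j
    · subst heq
      constructor
      · exact candAux_preserve f _ _ _ _
          ((PySem.Set.mem_add _ _ _).mpr (Or.inl ((PySem.Set.mem_add _ _ _).mpr (Or.inr rfl))))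
      · exact candAux_preserve f _ _ _ _
          ((PySem.Set.mem_add _ _ _).mpr (Or.inr rfl))
    · exact ih L (k + 1) j _ (by omega) (by omega) hjj (by omega)

def candFold (rs : List Int) : PySem.Set Int :=
  rs.foldl (fun s L => candAux (L.toNat + 1) L 1 s) PySem.Set.empty

theorem candFold_preserve : ∀ (rs : List Int) (s : PySem.Set Int) (x : Int),
    x ∈ s → x ∈ rs.foldl (fun s L => candAux (L.toNat + 1) L 1 s) s := by
  intro rs
  induction rs with
  | nil => intro s x hx; simpa using hx
  | cons L t ih => intro s x hx; exact ih _ x (candAux_preserve _ _ _ _ _ hx)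

theorem candFold_mem (rs : List Int) (Ls j : Int) (hL : Ls ∈ rs) (hj : 1 ≤ j) (hjj : j * j ≤ Ls) :
    j ∈ candFold rs ∧ PySem.Int.floordiv Ls j ∈ candFold rs := by
  obtain ⟨s1, s2, rfl⟩ := List.append_of_mem hL
  have hjL : j ≤ Ls := le_trans (by nlinarith) hjj
  have hfuel : (j - 1).toNat < Ls.toNat + 1 := by omega
  have hin := candAux_mem (Ls.toNat + 1) Ls 1 j
    (s1.foldl (fun s L => candAux (L.toNat + 1) L 1 s) PySem.Set.empty) (by omega) hj hjj hfuel
  unfold candFold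
  rw [List.foldl_append, List.foldl_cons]
  exact ⟨candFold_preserve s2 _ j hin.1, candFold_preserve s2 _ _ hin.2⟩

-- ---- arithmetic: floor-division blocks ----
theorem fd_bracket (L i : Int) (hi : 0 < i) :
    (PySem.Int.floordiv L i) * i ≤ L ∧ L < (PySem.Int.floordiv L i + 1) * i :=
  (PySem.Int.floordiv_eq_iff_of_pos hi).mp rfl

theorem fd_one_le (L i : Int) (h2 : 0 < i) (hiL : i ≤ L) : 1 ≤ PySem.Int.floordiv L i :=
  (PySem.Int.le_floordiv_iff_mul_le h2).mpr (by omega)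

theorem Sval_nonneg (ls : List Int) (k : Int) (h2 : 2 ≤ k) (hex : ∃ L ∈ ls, k ≤ L) :
    0 ≤ Sval ls k := by
  obtain ⟨L0, hL0, hkL0⟩ := hex
  have hL0f : L0 ∈ ls.filter (fun L => decide (k ≤ L)) :=
    List.mem_filter.mpr ⟨hL0, by simpa using hkL0⟩
  obtain ⟨t1, t2, hsplit⟩ := List.append_of_mem hL0f
  have hall : ∀ x ∈ (ls.filter (fun L => decide (k ≤ L))).map (fun L => PySem.Int.floordiv L k),
      1 ≤ x := by
    intro x hx
    obtain ⟨L, hLmem, rfl⟩ := List.mem_map.mp hx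
    have hkL : k ≤ L := by simpa using (List.mem_filter.mp hLmem).2
    exact fd_one_le L k (by omega) hkL
  have hsum : 1 ≤ ((ls.filter (fun L => decide (k ≤ L))).map (fun L => PySem.Int.floordiv L k)).sum := by
    rw [hsplit]
    rw [List.map_append, List.map_cons, List.sum_append, List.sum_cons]
    have h1 : 0 ≤ (t1.map (fun L => PySem.Int.floordiv L k)).sum :=
      List.sum_nonneg (by
        intro x hx
        have : x ∈ (ls.filter (fun L => decide (k ≤ L))).map (fun L => PySem.Int.floordiv L k) := by
          rw [hsplit, List.map_append]
          exact List.mem_append.mpr (Or.inl hx)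
        linarith [hall x this])
    have h2' : 0 ≤ (t2.map (fun L => PySem.Int.floordiv L k)).sum :=
      List.sum_nonneg (by
        intro x hx
        have : x ∈ (ls.filter (fun L => decide (k ≤ L))).map (fun L => PySem.Int.floordiv L k) := by
          rw [hsplit, List.map_append, List.map_cons]
          exact List.mem_append.mpr (Or.inr (List.mem_cons.mpr (Or.inr hx)))
        linarith [hall x this])
    have h3 : 1 ≤ PySem.Int.floordiv L0 k := fd_one_le L0 k (by omega) hkL0
    linarith
  unfold Sval
  linarith

theorem block_dominate (ls : List Int) (k : Int) (h2 : 2 ≤ k) (hex : ∃ L ∈ ls, k ≤ L) :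
    ∃ r Lstar j, Lstar ∈ ls ∧ k ≤ Lstar ∧ k ≤ r ∧ r ≤ Lstar ∧ 1 ≤ j ∧ j * j ≤ Lstar ∧
      (r = j ∨ r = PySem.Int.floordiv Lstar j) ∧ Sval ls r = Sval ls k ∧
      (k - 1) * Sval ls k ≤ (r - 1) * Sval ls r := by
  have hkpos : (0 : Int) < k := by omega
  obtain ⟨L0, hL0, hkL0⟩ := hex
  have hL0f : L0 ∈ ls.filter (fun L => decide (k ≤ L)) :=
    List.mem_filter.mpr ⟨hL0, by simpa using hkL0⟩
  -- facts about every active L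
  have hact : ∀ L : Int, k ≤ L →
      1 ≤ PySem.Int.floordiv L k ∧ k ≤ PySem.Int.floordiv L (PySem.Int.floordiv L k) ∧
      PySem.Int.floordiv L (PySem.Int.floordiv L k) ≤ L := by
    intro L hkL
    have hq1 : 1 ≤ PySem.Int.floordiv L k := fd_one_le L k hkpos hkL
    have hqpos : (0 : Int) < PySem.Int.floordiv L k := by omega
    have hbr := fd_bracket L k hkpos
    have hkg : k ≤ PySem.Int.floordiv L (PySem.Int.floordiv L k) :=
      (PySem.Int.le_floordiv_iff_mul_le hqpos).mpr (by nlinarith [hbr.1])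
    have hbr2 := fd_bracket L (PySem.Int.floordiv L k) hqpos
    have hgL : PySem.Int.floordiv L (PySem.Int.floordiv L k) ≤ L := by nlinarith [hbr2.1]
    exact ⟨hq1, hkg, hgL⟩
  cases hmin : PySem.List.min? (ls.filter (fun L => decide (k ≤ L)))
      (fun L => PySem.Int.floordiv L (PySem.Int.floordiv L k)) with
  | none =>
    exfalso
    have := (PySem.List.min?_eq_none_iff _ _).mp hmin
    rw [this] at hL0f
    simp at hL0f
  | some Lstar =>
    have hLsf := PySem.List.min?_mem hmin
    have hLs_mem : Lstar ∈ ls := (List.mem_filter.mp hLsf).1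
    have hkLs : k ≤ Lstar := by simpa using (List.mem_filter.mp hLsf).2
    set q := PySem.Int.floordiv Lstar k with hq
    set r := PySem.Int.floordiv Lstar q with hr
    have hfacts := hact Lstar hkLs
    have hq1 : 1 ≤ q := hfacts.1
    have hkr : k ≤ r := hfacts.2.1
    have hrLs : r ≤ Lstar := hfacts.2.2
    have hrmin : ∀ L ∈ ls.filter (fun L => decide (k ≤ L)),
        r ≤ PySem.Int.floordiv L (PySem.Int.floordiv L k) := PySem.List.min?_isMin hmin
    -- block equality for every active L
    have hblock : ∀ L : Int, L ∈ ls → k ≤ L → PySem.Int.floordiv L r = PySem.Int.floordiv L k := by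
      intro L hLmem hkL
      have hLf : L ∈ ls.filter (fun Lx => decide (k ≤ Lx)) :=
        List.mem_filter.mpr ⟨hLmem, by simpa using hkL⟩
      have hrg : r ≤ PySem.Int.floordiv L (PySem.Int.floordiv L k) := hrmin L hLf
      have hq1L : 1 ≤ PySem.Int.floordiv L k := (hact L hkL).1
      have hqLpos : (0 : Int) < PySem.Int.floordiv L k := by omega
      have hrpos : (0 : Int) < r := by omega
      have hbrk := fd_bracket L k hkpos
      refine (PySem.Int.floordiv_eq_iff_of_pos hrpos).mpr ⟨?_, ?_⟩
      · have := (PySem.Int.le_floordiv_iff_mul_le hqLpos).mp hrg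
        nlinarith
      · have hLk : L < (PySem.Int.floordiv L k + 1) * k := hbrk.2
        nlinarith
    -- Sval equality
    have hSval : Sval ls r = Sval ls k := by
      have hfil : ls.filter (fun L => decide (r ≤ L)) = ls.filter (fun L => decide (k ≤ L)) := by
        apply List.filter_congr
        intro L hLmem
        by_cases hkL : k ≤ L
        · have hLf : L ∈ ls.filter (fun Lx => decide (k ≤ Lx)) :=
            List.mem_filter.mpr ⟨hLmem, by simpa using hkL⟩
          have : r ≤ L := le_trans (hrmin L hLf) (hact L hkL).2.2
          simp [this, hkL]
        · have : ¬ r ≤ L := by omega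
          simp [this, hkL]
      unfold Sval
      rw [hfil]
      congr 1
      apply congrArg
      apply List.map_congr_left
      intro L hLf
      have hkL : k ≤ L := by simpa using (List.mem_filter.mp hLf).2
      exact hblock L (List.mem_filter.mp hLf).1 hkL
    have hS0 : 0 ≤ Sval ls k := Sval_nonneg ls k h2 ⟨L0, hL0, hkL0⟩
    have hmono : (k - 1) * Sval ls k ≤ (r - 1) * Sval ls r := by
      rw [hSval]
      exact mul_le_mul_of_nonneg_right (by omega) hS0
    by_cases hq2 : q * q ≤ Lstar
    · exact ⟨r, Lstar, q, hLs_mem, hkLs, hkr, hrLs, hq1, hq2, Or.inr hr, hSval, hmono⟩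
    · have hbrq := fd_bracket Lstar q (by omega)
      have hrq : r ≤ q := by nlinarith [hbrq.1]
      have hrr : r * r ≤ Lstar := by nlinarith [hbrq.1]
      exact ⟨r, Lstar, r, hLs_mem, hkLs, hkr, hrLs, by omega, hrr, Or.inl rfl, hSval, hmono⟩

-- ---- the two big-savings folds, in closed form over the runs ----
def innerMaxA (m : Array Int) : Int :=
  match PySem.List.max? ((List.range m.size).map (fun (j : Nat) => (((j : Int) + 1) - 1) * m.getD j 0))
      (fun x => x) with
  | some v => v
  | none => 0

def bigA (runs : List (String × Int)) : Int :=
  (pastesOf runs).values.foldl (fun acc m => max acc (innerMaxA m)) 0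

def bigB (runs : List (String × Int)) : Int :=
  (groupsOf runs).values.foldl
    (fun acc rs =>
      let m := match PySem.List.max? rs (fun x => x) with | some v => v | none => 0
      let cand := rs.foldl (fun s L => candAux (L.toNat + 1) L 1 s) PySem.Set.empty
      cand.foldl
        (fun acc2 i2 =>
          if 2 ≤ i2 ∧ i2 ≤ m then
            max acc2 ((i2 - 1) *
              (rs.foldl (fun s L => if i2 ≤ L then s + PySem.Int.floordiv L i2 else s) (-1)))
          else acc2)
        acc)
    0

theorem molasses_closed (n : Int) (ch : String) (ct : List String) (lh : Int) (lt : List Int) :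
    molasses n (ch :: ct) (lh :: lt)
      = (lh :: lt).sum - bigA (consRuns ch lh (List.zip ct lt))
        + (if bigA (consRuns ch lh (List.zip ct lt)) ≠ 0 then 1 else 0) := by
  have hcomp := compress_foldl (List.zip ct lt) [] ch lh
  rw [List.nil_append] at hcomp
  simp only [molasses, List.drop_succ_cons, List.drop_zero, List.headI_cons]
  simp only [hcomp]
  rfl

theorem molasses_alt_closed (n : Int) (ch : String) (ct : List String) (lh : Int) (lt : List Int) :
    molasses_alt n (ch :: ct) (lh :: lt)
      = (lh :: lt).sum - bigB (consRuns ch lh (List.zip ct lt))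
        + (if bigB (consRuns ch lh (List.zip ct lt)) ≠ 0 then 1 else 0) := by
  simp only [molasses_alt, List.zip_cons_cons]
  simp only [buildRuns_cons]
  rfl

theorem sEval_eq (rs : List Int) (i2 : Int) :
    rs.foldl (fun s L => if i2 ≤ L then s + PySem.Int.floordiv L i2 else s) (-1) = Sval rs i2 := by
  rw [PySem.List.foldl_ite_eq_foldl_filter (fun L => i2 ≤ L)
      (fun s L => s + PySem.Int.floordiv L i2) rs (-1),
    PySem.List.foldl_add]
  unfold Sval
  ring

theorem big_eq (runs : List (String × Int)) : bigA runs = bigB runs := by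
  obtain ⟨hkeysA, hndA, hinnerA⟩ := pastesOf_ok runs
  have hvaluesA : (pastesOf runs).values =
      (PySem.Set.ofList (runs.map (fun p => p.1))).map
        (fun w => (pastesOf runs).getD w #[]) := by
    rw [PySem.Dict.values_eq_map_keys _ hndA (#[] : Array Int), hkeysA]
  have hvaluesB : (groupsOf runs).values =
      (PySem.Set.ofList (runs.map (fun p => p.1))).map (fun w => lensOf runs w) := by
    rw [PySem.Dict.values_eq_map_keys _ (groupsOf_nodup runs) ([] : List Int), groupsOf_keys]
    exact List.map_congr_left (fun w _ => groupsOf_getD runs w)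
  -- step functions
  set fA : Int → Array Int → Int := fun acc m => max acc (innerMaxA m) with hfA
  set fB : Int → List Int → Int := fun acc rs =>
      let m := match PySem.List.max? rs (fun x => x) with | some v => v | none => 0
      let cand := rs.foldl (fun s L => candAux (L.toNat + 1) L 1 s) PySem.Set.empty
      cand.foldl
        (fun acc2 i2 =>
          if 2 ≤ i2 ∧ i2 ≤ m then
            max acc2 ((i2 - 1) *
              (rs.foldl (fun s L => if i2 ≤ L then s + PySem.Int.floordiv L i2 else s) (-1)))
          else acc2)
        acc with hfB
  have hmonoA : ∀ (b : Int) (x : Array Int), b ≤ fA b x := fun b x => le_max_left _ _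
  have hinnerStepMono : ∀ (rs : List Int) (mm : Int) (b2 : Int) (i2 : Int),
      b2 ≤ (if 2 ≤ i2 ∧ i2 ≤ mm then
        max b2 ((i2 - 1) *
          (rs.foldl (fun s L => if i2 ≤ L then s + PySem.Int.floordiv L i2 else s) (-1)))
        else b2) := by
    intro rs mm b2 i2
    split_ifs
    · exact le_max_left _ _
    · exact le_refl _
  have hmonoB : ∀ (b : Int) (x : List Int), b ≤ fB b x := by
    intro b x
    exact pvFoldl_ge_init _ _ b (fun b2 i2 _ => hinnerStepMono x _ b2 i2)
  have hbigB0 : (0 : Int) ≤ bigB runs :=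
    pvFoldl_ge_init fB _ 0 (fun b x _ => hmonoB b x)
  have hbigA0 : (0 : Int) ≤ bigA runs :=
    pvFoldl_ge_init fA _ 0 (fun b x _ => hmonoA b x)
  -- (1) per-letter: A's inner max is ≤ bigB
  have hAleB : ∀ w ∈ PySem.Set.ofList (runs.map (fun p => p.1)),
      innerMaxA ((pastesOf runs).getD w #[]) ≤ bigB runs := by
    intro w hw
    have hwk : w ∈ (pastesOf runs).keys := by rw [hkeysA]; exact hw
    obtain ⟨h1I, hiffI, h0I, hvalI⟩ := hinnerA w hwk
    set m := (pastesOf runs).getD w #[] with hm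
    set ls := lensOf runs w with hls
    cases hmax : PySem.List.max? ((List.range m.size).map
        (fun (j : Nat) => (((j : Int) + 1) - 1) * m.getD j 0)) (fun x => x) with
    | none =>
      exfalso
      have := (PySem.List.max?_eq_none_iff _ _).mp hmax
      rw [List.map_eq_nil_iff, List.range_eq_nil] at this
      omega
    | some v =>
      have hvA : innerMaxA m = v := by simp only [innerMaxA, hmax]
      rw [hvA]
      have hvmem := PySem.List.max?_mem hmax
      obtain ⟨jj, hjr, hvj⟩ := List.mem_map.mp hvmem
      have hjlt : jj < m.size := List.mem_range.mp hjr
      by_cases hj0 : jj = 0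
      · subst hj0
        rw [← hvj, h0I]
        simpa using hbigB0
      · have h2 : 2 ≤ ((jj : Int) + 1) := by omega
        have hkle : ((jj : Int) + 1) ≤ (m.size : Int) := by omega
        have hex : ∃ L ∈ ls, ((jj : Int) + 1) ≤ L := (hiffI _ h2).mp hkle
        have hidx : (((jj : Int) + 1) - 1).toNat = jj := by omega
        have hval : m.getD jj 0 = Sval ls ((jj : Int) + 1) := by
          have h' := hvalI ((jj : Int) + 1) h2 hkle
          rw [hidx] at h'
          exact h' 
        rw [← hvj, hval]
        obtain ⟨r, Lstar, j, hLsmem, hkLs, hkr, hrLs, hj1, hjj', hrj, hSv, hmono⟩ :=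
          block_dominate ls ((jj : Int) + 1) h2 hex
        have hrcand : r ∈ candFold ls := by
          have := candFold_mem ls Lstar j hLsmem hj1 hjj'
          rcases hrj with h | h
          · rw [h]; exact this.1
          · rw [h]; exact this.2
        cases hmaxls : PySem.List.max? ls (fun x => x) with
        | none =>
          exfalso
          have := (PySem.List.max?_eq_none_iff _ _).mp hmaxls
          rw [this] at hLsmem
          simp at hLsmem
        | some mv =>
          have hrm : r ≤ mv := le_trans hrLs (by simpa using PySem.List.max?_isMax hmaxls Lstar hLsmem)
          have hlsval : ls ∈ (PySem.Set.ofList (runs.map (fun p => p.1))).map (fun w => lensOf runs w) :=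
            List.mem_map.mpr ⟨w, hw, rfl⟩
          have hbound : (r - 1) * Sval ls r ≤ bigB runs := by
            unfold bigB
            rw [hvaluesB]
            refine pvLe_foldl_of_mem fB _ ls _ 0 (fun b y _ => hmonoB b y) hlsval ?_
            intro b
            show (r - 1) * Sval ls r ≤
              ((candFold ls).foldl
                (fun acc2 i2 =>
                  if 2 ≤ i2 ∧ i2 ≤ (match PySem.List.max? ls (fun x => x) with | some v => v | none => 0) then
                    max acc2 ((i2 - 1) *
                      (ls.foldl (fun s L => if i2 ≤ L then s + PySem.Int.floordiv L i2 else s) (-1)))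
                  else acc2)
                b)
            refine pvLe_foldl_of_mem _ _ r _ b
              (fun b2 i2 _ => hinnerStepMono ls _ b2 i2) hrcand ?_
            intro b2
            rw [hmaxls]
            rw [if_pos ⟨by omega, hrm⟩]
            rw [sEval_eq]
            exact le_max_right _ _
          have hmono' : (((jj : Int) + 1) - 1) * Sval ls ((jj : Int) + 1) ≤ (r - 1) * Sval ls r := hmono
          exact le_trans hmono' hbound
  -- (2) per-letter: B's candidate fold stays ≤ bigA
  have hBleA : ∀ w ∈ PySem.Set.ofList (runs.map (fun p => p.1)), ∀ acc : Int,
      acc ≤ bigA runs → fB acc (lensOf runs w) ≤ bigA runs := by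
    intro w hw acc hacc
    have hwk : w ∈ (pastesOf runs).keys := by rw [hkeysA]; exact hw
    obtain ⟨h1I, hiffI, h0I, hvalI⟩ := hinnerA w hwk
    set m := (pastesOf runs).getD w #[] with hm
    set ls := lensOf runs w with hls
    show (fB acc ls) ≤ bigA runs
    rw [hfB]
    refine pvFoldl_le_bound _ _ acc _ hacc ?_
    intro acc2 i2 _ hacc2
    split_ifs with hcond
    · obtain ⟨h2i, him⟩ := hcond
      cases hmaxls : PySem.List.max? ls (fun x => x) with
      | none =>
        exfalso
        rw [hmaxls] at him
        simp at him
        omega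
      | some mv =>
        rw [hmaxls] at him
        simp at him
        have hmvmem : mv ∈ ls := PySem.List.max?_mem hmaxls
        have hkle : i2 ≤ (m.size : Int) := (hiffI i2 h2i).mpr ⟨mv, hmvmem, him⟩
        have hval : m.getD (i2 - 1).toNat 0 = Sval ls i2 := hvalI i2 h2i hkle
        have hcast : (((i2 - 1).toNat : Int)) = i2 - 1 := by omega
        have hitem_mem : (i2 - 1) * m.getD (i2 - 1).toNat 0 ∈
            (List.range m.size).map (fun (j : Nat) => (((j : Int) + 1) - 1) * m.getD j 0) := by
          refine List.mem_map.mpr ⟨(i2 - 1).toNat, List.mem_range.mpr (by omega), ?_⟩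
          rw [hcast]
          ring_nf
        cases hmaxI : PySem.List.max? ((List.range m.size).map
            (fun (j : Nat) => (((j : Int) + 1) - 1) * m.getD j 0)) (fun x => x) with
        | none =>
          exfalso
          have := (PySem.List.max?_eq_none_iff _ _).mp hmaxI
          rw [this] at hitem_mem
          simp at hitem_mem
        | some v =>
          have hle1 : (i2 - 1) * m.getD (i2 - 1).toNat 0 ≤ v := by
            simpa using PySem.List.max?_isMax hmaxI _ hitem_mem
          have hle2 : v ≤ bigA runs := by
            unfold bigA
            rw [hvaluesA]
            refine pvLe_foldl_of_mem fA _ m v 0 (fun b y _ => hmonoA b y)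
              (List.mem_map.mpr ⟨w, hw, rfl⟩) ?_
            intro b
            have : innerMaxA m = v := by simp only [innerMaxA, hmaxI]
            rw [hfA]
            show v ≤ max b (innerMaxA m)
            rw [this]
            exact le_max_right _ _
          rw [sEval_eq, ← hval]
          exact max_le hacc2 (le_trans hle1 hle2)
    · exact hacc2
  -- antisymmetry
  apply le_antisymm
  · unfold bigA
    rw [hvaluesA]
    refine pvFoldl_le_bound fA _ 0 _ hbigB0 ?_
    intro acc x hx hacc
    obtain ⟨w, hw, rfl⟩ := List.mem_map.mp hx
    exact max_le hacc (hAleB w hw)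
  · unfold bigB
    rw [hvaluesB]
    refine pvFoldl_le_bound fB _ 0 _ hbigA0 ?_
    intro acc x hx hacc
    obtain ⟨w, hw, rfl⟩ := List.mem_map.mp hx
    exact hBleA w hw acc hacc

-- ===== VERDICT (by name: the statement is the Claim_ definition above) =====
theorem molasses_spec : Claim_equal_molasses := by
  intro n c l _ hPre
  obtain ⟨hc, hl⟩ := hPre
  cases c with
  | nil => exact absurd rfl hc
  | cons ch ct =>
    cases l with
    | nil => exact absurd rfl hl
    | cons lh lt =>
      unfold Spec_molasses
      rw [molasses_closed, molasses_alt_closed, big_eq]
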